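-- pv_equiv track=rewrite | github.com/kikimara22891/Grimoire | modules/pass_decrypted.py | identify_hash
-- ===== SOURCE A (Python) =====
-- def identify_hash(h):
--     h = h.strip().lower()
--     l = len(h)
--
--     if l == 32 and all(c in '0123456789abcdef' for c in h):
--         return "MD5"
--
--     if l == 40 and all(c in '0123456789abcdef' for c in h):
--         return "SHA-1"
--
--     if l == 64 and all(c in '0123456789abcdef' for c in h):
--         return "SHA-256"
--
--     if l == 128 and all(c in '0123456789abcdef' for c in h):
--         return "SHA-512"
--
--     if l == 32 and all(c in '0123456789ABCDEF' for c in h):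
--         return "NTLM"
--
--     if l == 60 and h.startswith('$2'):
--         return "bcrypt"
--     return "Unknown"
-- ===== SOURCE B (Python) =====
-- _BY_LEN = {32: "MD5", 40: "SHA-1", 64: "SHA-256", 128: "SHA-512"}
--
-- def identify_hash(h):
--     h = h.strip().lower()
--     l = len(h)
--     name = _BY_LEN.get(l)
--     if name is not None and all(c in '0123456789abcdef' for c in h):
--         return name
--     if l == 60 and h.startswith('$2'):
--         return "bcrypt"
--     return "Unknown"
-- ===== Notes on version B (the rewrite author's own statement) =====
-- stated objective: simpler
-- what changed: Replaces four repeated length-gated hex scans with one length-to-name table lookup plus a single hex check, and drops the NTLM branch, which is unreachable after lower() (uppercase hex never survives lowercasing, and all-digit strings hit the MD5 branch first).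
import Mathlib
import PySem

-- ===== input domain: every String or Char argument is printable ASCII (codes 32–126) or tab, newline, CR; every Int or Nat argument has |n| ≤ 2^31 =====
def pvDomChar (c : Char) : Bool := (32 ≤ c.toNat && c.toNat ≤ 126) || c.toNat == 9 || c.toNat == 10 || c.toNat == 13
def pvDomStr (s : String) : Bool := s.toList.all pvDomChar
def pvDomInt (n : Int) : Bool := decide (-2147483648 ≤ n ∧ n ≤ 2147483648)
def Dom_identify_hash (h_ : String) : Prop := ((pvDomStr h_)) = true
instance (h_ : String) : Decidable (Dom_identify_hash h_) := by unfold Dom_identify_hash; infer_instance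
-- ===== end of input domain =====

-- B replaces A's four repeated length-gated hex scans by one length→name table lookup with a
-- single hex check, and omits A's NTLM branch, which is unreachable after lower(). Objective: simpler.


-- ===== PORT A =====
-- 'c in "0123456789abcdef"' for a single char = list membership
def identify_hash (h_ : String) : String :=
  let h := PySem.Str.lower (PySem.Str.strip h_)
  let l := PySem.Str.len h
  if l = 32 ∧ h.toList.all (fun c => "0123456789abcdef".toList.contains c) = true then "MD5"
  else if l = 40 ∧ h.toList.all (fun c => "0123456789abcdef".toList.contains c) = true then "SHA-1"
  else if l = 64 ∧ h.toList.all (fun c => "0123456789abcdef".toList.contains c) = true then "SHA-256"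
  else if l = 128 ∧ h.toList.all (fun c => "0123456789abcdef".toList.contains c) = true then "SHA-512"
  else if l = 32 ∧ h.toList.all (fun c => "0123456789ABCDEF".toList.contains c) = true then "NTLM"
  else if l = 60 ∧ PySem.Str.startswith h "$2" = true then "bcrypt"
  else "Unknown"

-- ===== PORT B =====
-- the module-level dict _BY_LEN = {32:'MD5', 40:'SHA-1', 64:'SHA-256', 128:'SHA-512'}
def pvByLen : PySem.Dict Int String :=
  ((((PySem.Dict.empty).insert 32 "MD5").insert 40 "SHA-1").insert 64 "SHA-256").insert 128 "SHA-512"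

def identify_hash_alt (h_ : String) : String :=
  let h := PySem.Str.lower (PySem.Str.strip h_)
  let l := PySem.Str.len h
  let name := pvByLen.get? l
  if name.isSome = true ∧ h.toList.all (fun c => "0123456789abcdef".toList.contains c) = true then
    name.getD ""
  else if l = 60 ∧ PySem.Str.startswith h "$2" = true then "bcrypt"
  else "Unknown"

-- ===== PRECONDITION & SPEC =====
def Spec_identify_hash (h_ : String) (out : String) : Prop := out = identify_hash_alt h_
instance (h_ : String) (out : String) : Decidable (Spec_identify_hash h_ out) := by unfold Spec_identify_hash; infer_instance

-- ===== CLAIM (what is proved, stated in full; the proofs are below) =====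
def Claim_equal_identify_hash : Prop := ∀ (h_ : String), Dom_identify_hash h_ → Spec_identify_hash h_ (identify_hash h_)

-- ===== LEMMAS AND PROOFS =====

-- the literal hex alphabets as char lists
theorem pv_upperList : "0123456789ABCDEF".toList
    = ['0','1','2','3','4','5','6','7','8','9','A','B','C','D','E','F'] := by decide

theorem pv_lowerList : "0123456789abcdef".toList
    = ['0','1','2','3','4','5','6','7','8','9','a','b','c','d','e','f'] := by decide

-- the table lookup, characterised
theorem pv_get_byLen (l : Int) : pvByLen.get? l =
    if l = 128 then some "SHA-512" else if l = 64 then some "SHA-256"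
    else if l = 40 then some "SHA-1" else if l = 32 then some "MD5" else none := by
  simp only [pvByLen, PySem.Dict.get?_insert]
  split_ifs <;> simp [PySem.Dict.get?, PySem.Dict.empty]

-- lowercasing never yields an ASCII uppercase letter
theorem pv_isupper_lowerChar (c : Char) : PySem.Chars.isupper (PySem.Chars.lowerChar c) = false := by
  unfold PySem.Chars.lowerChar
  split
  · rename_i h
    unfold PySem.Chars.isupper at *
    simp only [Bool.and_eq_true, decide_eq_true_eq, Char.le_def, UInt32.le_iff_toNat_le] at h
    have h' : 65 ≤ c.toNat ∧ c.toNat ≤ 90 := by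
      have e1 : ('A').val.toNat = 65 := by decide
      have e2 : ('Z').val.toNat = 90 := by decide
      rw [e1, e2] at h; exact h
    have hv : (Char.ofNat (c.toNat + 32)).toNat = c.toNat + 32 := by
      rw [Char.toNat_ofNat, if_pos]
      constructor; omega
    simp only [Bool.and_eq_false_iff, decide_eq_false_iff_not, Char.le_def, UInt32.le_iff_toNat_le]
    right
    show ¬ ((Char.ofNat (c.toNat + 32)).val.toNat ≤ ('Z').val.toNat)
    have e3 : (Char.ofNat (c.toNat + 32)).val.toNat = (Char.ofNat (c.toNat + 32)).toNat := rfl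
    have e2 : ('Z').val.toNat = 90 := by decide
    rw [e3, hv, e2]; omega
  · rename_i h
    simpa [PySem.Chars.isupper] using h

-- a non-uppercase char in the UPPER hex set is in the lower hex set
theorem pv_mem_upper_imp_lower (d : Char) (hiu : PySem.Chars.isupper d = false)
    (h : ("0123456789ABCDEF".toList.contains d) = true) :
    ("0123456789abcdef".toList.contains d) = true := by
  rw [pv_upperList] at h
  rw [pv_lowerList]
  simp only [List.contains_eq_mem, List.mem_cons, List.not_mem_nil, or_false,
    decide_eq_true_eq] at h
  rcases h with rfl|rfl|rfl|rfl|rfl|rfl|rfl|rfl|rfl|rfl|rfl|rfl|rfl|rfl|rfl|rfl <;>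
    first
      | decide
      | exact absurd hiu (by decide)

theorem pv_all_upper_imp_all_lower (s : List Char)
    (h : (s.map PySem.Chars.lowerChar).all (fun c => "0123456789ABCDEF".toList.contains c) = true) :
    (s.map PySem.Chars.lowerChar).all (fun c => "0123456789abcdef".toList.contains c) = true := by
  simp only [List.all_map, List.all_eq_true, Function.comp] at h ⊢
  intro c hc
  exact pv_mem_upper_imp_lower _ (pv_isupper_lowerChar c) (h c hc)

-- the shared core, over the abstract test results: A's if-chain equals B's
-- table-lookup form whenever the upper-hex test implies the lower-hex test
theorem pv_core (l : Int) (hx hX sw : Prop) [Decidable hx] [Decidable hX] [Decidable sw]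
    (himp : hX → hx) :
    (if l = 32 ∧ hx then "MD5"
     else if l = 40 ∧ hx then "SHA-1"
     else if l = 64 ∧ hx then "SHA-256"
     else if l = 128 ∧ hx then "SHA-512"
     else if l = 32 ∧ hX then "NTLM"
     else if l = 60 ∧ sw then "bcrypt"
     else "Unknown")
    = (if ((if l = 128 then some "SHA-512" else if l = 64 then some "SHA-256"
            else if l = 40 then some "SHA-1" else if l = 32 then some "MD5"
            else none) : Option String).isSome = true ∧ hx
       then ((if l = 128 then some "SHA-512" else if l = 64 then some "SHA-256"
              else if l = 40 then some "SHA-1" else if l = 32 then some "MD5"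
              else none) : Option String).getD ""
       else if l = 60 ∧ sw then "bcrypt"
       else "Unknown") := by
  split_ifs <;> simp_all

-- ===== VERDICT (by name: the statement is the Claim_ definition above) =====
theorem identify_hash_spec : Claim_equal_identify_hash := by
  intro h_ _
  have hmap : (PySem.Str.lower (PySem.Str.strip h_)).toList
      = ((PySem.Str.strip h_).toList).map PySem.Chars.lowerChar := by
    simp [PySem.Chars.lower]
  show (let h := PySem.Str.lower (PySem.Str.strip h_)
        let l := PySem.Str.len h
        if l = 32 ∧ h.toList.all (fun c => "0123456789abcdef".toList.contains c) = true then "MD5"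
        else if l = 40 ∧ h.toList.all (fun c => "0123456789abcdef".toList.contains c) = true then "SHA-1"
        else if l = 64 ∧ h.toList.all (fun c => "0123456789abcdef".toList.contains c) = true then "SHA-256"
        else if l = 128 ∧ h.toList.all (fun c => "0123456789abcdef".toList.contains c) = true then "SHA-512"
        else if l = 32 ∧ h.toList.all (fun c => "0123456789ABCDEF".toList.contains c) = true then "NTLM"
        else if l = 60 ∧ PySem.Str.startswith h "$2" = true then "bcrypt"
        else "Unknown")
     = (let h := PySem.Str.lower (PySem.Str.strip h_)
        let l := PySem.Str.len h
        let name := pvByLen.get? l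
        if name.isSome = true ∧ h.toList.all (fun c => "0123456789abcdef".toList.contains c) = true then
          name.getD ""
        else if l = 60 ∧ PySem.Str.startswith h "$2" = true then "bcrypt"
        else "Unknown")
  simp only [pv_get_byLen]
  exact pv_core (PySem.Str.len (PySem.Str.lower (PySem.Str.strip h_))) _ _ _
    (fun h => by rw [hmap] at h ⊢; exact pv_all_upper_imp_all_lower _ h)
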